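-- pv_equiv track=rewrite | github.com/adutev/Programming-0 | week5/budget.py | on_budget
-- ===== SOURCE A (Python) =====
-- def on_budget(books, budget):
-- 	books_on_budget = 0
-- 	loan = 0
-- 	books = sorted(books)
--
-- 	for book in books:
-- 		if budget >= book:
-- 			books_on_budget += 1
-- 			budget -= book
-- 		else:
-- 			budget -= book
--
-- 	if budget < 0:
-- 		loan = abs(budget)
--
-- 	result = {
-- 		"books_on_budget": books_on_budget,
-- 		"loan" : loan
-- 	}
--
-- 	return result
--
-- books = [50, 60, 100]
--
-- budget = 20
-- ===== SOURCE B (Python) =====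
-- def on_budget(books, budget):
--     ordered = sorted(books)
--     count = sum(1 for k in range(1, len(books) + 1) if sum(ordered[:k]) <= budget)
--     return {
--         "books_on_budget": count,
--         "loan": max(0, sum(books) - budget),
--     }
-- ===== Notes on version B (the rewrite author's own statement) =====
-- stated objective: alternative
-- what changed: B is stateless and declarative: it counts the prefixes k of the sorted list whose slice sum sum(ordered[:k]) fits the fixed budget and computes the loan in closed form as max(0, sum(books)-budget), instead of A's single greedy loop that mutates the budget in both branches and takes abs at the end.
import Mathlib
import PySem

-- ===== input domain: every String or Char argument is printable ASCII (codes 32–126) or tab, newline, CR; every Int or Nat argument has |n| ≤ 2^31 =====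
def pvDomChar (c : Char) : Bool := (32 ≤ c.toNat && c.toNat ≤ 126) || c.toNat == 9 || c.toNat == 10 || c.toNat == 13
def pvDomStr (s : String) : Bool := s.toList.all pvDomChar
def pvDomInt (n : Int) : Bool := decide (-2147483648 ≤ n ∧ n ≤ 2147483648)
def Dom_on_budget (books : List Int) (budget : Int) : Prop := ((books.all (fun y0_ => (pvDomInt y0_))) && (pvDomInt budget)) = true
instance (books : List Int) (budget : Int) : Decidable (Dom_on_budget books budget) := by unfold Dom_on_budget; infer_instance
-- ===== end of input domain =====

-- B replaces A's stateful greedy loop (which mutates budget in both branches) by a stateless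
-- count of prefixes k with sum(ordered[:k]) <= budget plus a closed-form loan; objective:
-- alternative (B re-sums each prefix, so it is not faster).


-- ===== PORT A =====
-- A: sort, then one fused loop: if budget >= book then count+1 and subtract, else only subtract;
-- loan = abs(budget) if final budget < 0 else 0.
def on_budget (books : List Int) (budget : Int) : List (String × Int) :=
  let sortedBooks := PySem.List.sorted books (fun x => x) false
  let st := sortedBooks.foldl
    (fun (s : Int × Int) book =>
      if s.2 ≥ book then (s.1 + 1, s.2 - book) else (s.1, s.2 - book))
    (0, budget)
  let loan : Int := if st.2 < 0 then |st.2| else 0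
  [("books_on_budget", st.1), ("loan", loan)]

-- ===== PORT B =====
-- B: count = sum(1 for k in range(1, len(books)+1) if sum(ordered[:k]) <= budget);
-- loan = max(0, sum(books) - budget).  No mutated state, each prefix is summed on its own.
def on_budget_alt (books : List Int) (budget : Int) : List (String × Int) :=
  let ordered := PySem.List.sorted books (fun x => x) false
  let count : Int :=
    ((PySem.List.pyRange 1 ((books.length : Int) + 1) 1).map
      (fun k => if (PySem.List.slice ordered none (some k)).sum ≤ budget then (1 : Int) else 0)).sum
  [("books_on_budget", count), ("loan", max 0 (books.sum - budget))]

-- ===== PRECONDITION & SPEC =====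
def Spec_on_budget (books : List Int) (budget : Int) (out : List (String × Int)) : Prop := out = on_budget_alt books budget
instance (books : List Int) (budget : Int) (out : List (String × Int)) : Decidable (Spec_on_budget books budget out) := by unfold Spec_on_budget; infer_instance

-- ===== CLAIM (what is proved, stated in full; the proofs are below) =====
def Claim_equal_on_budget : Prop := ∀ (books : List Int) (budget : Int), Dom_on_budget books budget → Spec_on_budget books budget (on_budget books budget)

-- ===== LEMMAS AND PROOFS =====

-- Reference count: number of prefixes of l whose sum fits b.
def pvCnt (b : Int) : List Int → Int
  | [] => 0
  | x :: xs => (if x ≤ b then 1 else 0) + pvCnt (b - x) xs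

-- A's fused loop computes (count, remaining budget) = (c + pvCnt b l, b - sum l).
theorem foldA_eq (l : List Int) : ∀ (c b : Int),
    l.foldl (fun (s : Int × Int) book =>
        if s.2 ≥ book then (s.1 + 1, s.2 - book) else (s.1, s.2 - book)) (c, b)
      = (c + pvCnt b l, b - l.sum) := by
  induction l with
  | nil => intro c b; simp [pvCnt]
  | cons x xs ih =>
    intro c b
    simp only [List.foldl_cons, List.sum_cons, pvCnt]
    by_cases h : x ≤ b
    · rw [if_pos (by omega : b ≥ x), ih, if_pos h]
      simp only [Prod.mk.injEq]
      exact ⟨by ring, by ring⟩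
    · rw [if_neg (by omega : ¬ b ≥ x), ih, if_neg h]
      simp only [Prod.mk.injEq]
      exact ⟨by ring, by ring⟩

-- B's 0/1 sum over take-prefixes equals the reference count.
theorem sumB_eq (l : List Int) : ∀ (b : Int),
    ((List.range l.length).map
      (fun j => if (l.take (j + 1)).sum ≤ b then (1 : Int) else 0)).sum = pvCnt b l := by
  induction l with
  | nil => intro b; simp [pvCnt]
  | cons x xs ih =>
    intro b
    rw [List.length_cons, List.range_succ_eq_map, pvCnt]
    simp only [List.map_cons, List.map_map, List.sum_cons]
    have hx : (if ((x :: xs).take (0 + 1)).sum ≤ b then (1:Int) else 0) = (if x ≤ b then (1:Int) else 0) := by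
      simp
    rw [hx]
    congr 1
    rw [← ih (b - x)]
    congr 1
    apply List.map_congr_left
    intro j _
    simp only [Function.comp]
    have : ((x :: xs).take (j + 1 + 1)).sum = x + (xs.take (j + 1)).sum := by
      simp [List.take_succ_cons]
    rw [this]
    by_cases h : (xs.take (j + 1)).sum ≤ b - x
    · rw [if_pos (by omega), if_pos h]
    · rw [if_neg (by omega), if_neg h]

-- range(1, n+1) of B unfolds to List.range with slices becoming takes.
theorem mapB_eq (l : List Int) (b : Int) :
    ((PySem.List.pyRange 1 ((l.length : Int) + 1) 1).map
      (fun k => if (PySem.List.slice l none (some k)).sum ≤ b then (1 : Int) else 0))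
    = ((List.range l.length).map
      (fun j => if (l.take (j + 1)).sum ≤ b then (1 : Int) else 0)) := by
  rw [PySem.List.pyRange_one]
  have hlen : (((l.length : Int) + 1) - 1).toNat = l.length := by omega
  rw [hlen, List.map_map]
  apply List.map_congr_left
  intro j _
  simp only [Function.comp]
  have : PySem.List.slice l none (some ((1 : Int) + (j : Nat))) = l.take (j + 1) := by
    have := PySem.List.slice_to l (b := (1 : Int) + (j : Nat)) (by positivity)
    rw [this]
    congr 1
    omega
  rw [this]

theorem on_budget_eq (books : List Int) (budget : Int) :
    on_budget books budget = on_budget_alt books budget := by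
  have hperm : (PySem.List.sorted books (fun x => x) false).Perm books :=
    PySem.List.sorted_perm books (fun x => x) false
  have hsum : (PySem.List.sorted books (fun x => x) false).sum = books.sum := hperm.sum_eq
  have hlen : (PySem.List.sorted books (fun x => x) false).length = books.length :=
    hperm.length_eq
  simp only [on_budget, on_budget_alt, foldA_eq, ← hlen, mapB_eq, sumB_eq, hsum]
  have hloan : (if budget - books.sum < 0 then |budget - books.sum| else 0)
      = max 0 (books.sum - budget) := by
    by_cases h : budget - books.sum < 0
    · rw [if_pos h, abs_of_neg h]; omega
    · rw [if_neg h]; omega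
  rw [hloan]
  simp

-- ===== VERDICT (by name: the statement is the Claim_ definition above) =====
theorem on_budget_spec : Claim_equal_on_budget := by
  intro books budget _
  exact on_budget_eq books budget
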